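-- pv_equiv track=rewrite | github.com/gingerws/anise | anise/utils/documentation.py | markdown_downgrade_headings
-- ===== SOURCE A (Python) =====
-- def markdown_downgrade_headings(docsrc, levels):
--     result = ""
--     moresharps = "#" * levels
--     for line in docsrc.split("\n"):
--         if line.startswith("#"):
--             line = moresharps + line
--         result += line + "\n"
--     return result[:-1]
-- ===== SOURCE B (Python) =====
-- def markdown_downgrade_headings(docsrc, levels):
--     # single left-to-right scan: insert the extra sharps at every line start
--     # that carries a '#', instead of splitting into lines and re-joining
--     moresharps = "#" * levels
--     out = []
--     at_start = True
--     for ch in docsrc: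
--         if at_start and ch == "#":
--             out.append(moresharps)
--         out.append(ch)
--         at_start = ch == "\n"
--     return "".join(out)
-- ===== Notes on version B (the rewrite author's own statement) =====
-- stated objective: alternative
-- what changed: Replaced split-on-newline / per-line prefixing / join-with-trailing-newline-trim by a single character scan that tracks line starts and inserts the extra sharps in place.
import Mathlib
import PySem

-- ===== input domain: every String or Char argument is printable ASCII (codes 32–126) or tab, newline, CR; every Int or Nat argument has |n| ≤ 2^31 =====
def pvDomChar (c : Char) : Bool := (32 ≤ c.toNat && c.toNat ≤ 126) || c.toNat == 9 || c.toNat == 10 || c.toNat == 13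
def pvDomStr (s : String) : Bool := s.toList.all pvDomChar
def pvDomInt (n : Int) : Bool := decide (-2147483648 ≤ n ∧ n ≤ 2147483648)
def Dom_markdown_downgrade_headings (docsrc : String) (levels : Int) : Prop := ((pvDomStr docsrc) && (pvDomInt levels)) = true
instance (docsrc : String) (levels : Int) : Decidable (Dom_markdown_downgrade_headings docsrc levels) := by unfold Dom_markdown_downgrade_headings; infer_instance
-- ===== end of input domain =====

-- B is an alternative single-pass scan (no split/join); A = B is proved for all inputs.

-- ===== PORT A =====
-- literal port of A: split on "\n", prefix heading lines, accumulate with "\n", drop the last char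
def markdown_downgrade_headings (docsrc : String) (levels : Int) : String :=
  let moresharps : List Char := PySem.List.pyRepeat "#".toList levels
  let result : List Char :=
    (PySem.Chars.splitOn docsrc.toList "\n".toList).foldl
      (fun result line =>
        let line := if PySem.Chars.startswith line "#".toList then moresharps ++ line else line
        result ++ line ++ "\n".toList) []
  String.ofList (PySem.List.slice result none (some (-1)))

-- ===== PORT B =====
-- literal port of Source B: one fold over the characters with (out, at_start) state
def markdown_downgrade_headings_alt (docsrc : String) (levels : Int) : String :=
  let moresharps : List Char := PySem.List.pyRepeat "#".toList levels
  let st :=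
    docsrc.toList.foldl
      (fun (st : List Char × Bool) ch =>
        ((if st.2 && (ch == '#') then st.1 ++ moresharps else st.1) ++ [ch], ch == '\n'))
      ([], true)
  String.ofList st.1

-- ===== PRECONDITION & SPEC =====
def Spec_markdown_downgrade_headings (docsrc : String) (levels : Int) (out : String) : Prop := out = markdown_downgrade_headings_alt docsrc levels
instance (docsrc : String) (levels : Int) (out : String) : Decidable (Spec_markdown_downgrade_headings docsrc levels out) := by unfold Spec_markdown_downgrade_headings; infer_instance

-- ===== CLAIM (what is proved, stated in full; the proofs are below) =====
def Claim_equal_markdown_downgrade_headings : Prop := ∀ (docsrc : String) (levels : Int), Dom_markdown_downgrade_headings docsrc levels → Spec_markdown_downgrade_headings docsrc levels (markdown_downgrade_headings docsrc levels)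

-- ===== LEMMAS AND PROOFS =====

-- the per-line transformation of A
def pvF (more : List Char) (l : List Char) : List Char :=
  if PySem.Chars.startswith l "#".toList then more ++ l else l

-- structural-recursion view of B's scan
def pvSub (more : List Char) : List Char → Bool → List Char
  | [], _ => []
  | c :: rest, atStart =>
    (if atStart && (c == '#') then more else []) ++ c :: pvSub more rest (c == '\n')

-- B's fold equals pvSub (accumulator pulled out)
theorem pvSub_foldl (more : List Char) (cs : List Char) :
    ∀ (acc : List Char) (b : Bool),
      (cs.foldl (fun (st : List Char × Bool) ch =>
          ((if st.2 && (ch == '#') then st.1 ++ more else st.1) ++ [ch], ch == '\n'))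
        (acc, b)).1 = acc ++ pvSub more cs b := by
  induction cs with
  | nil => intro acc b; simp [pvSub]
  | cons c rest ih =>
    intro acc b
    simp only [List.foldl_cons, pvSub]
    rw [ih]
    split <;> simp

-- one-step unfoldings of splitOn.go (definitional)
theorem pvGo_zero (sep cur l : List Char) (acc : List (List Char)) :
    PySem.Chars.splitOn.go sep 0 l cur acc = ((cur.reverse ++ l) :: acc).reverse := rfl
theorem pvGo_nil (sep : List Char) (fuel : Nat) (cur : List Char) (acc : List (List Char)) :
    PySem.Chars.splitOn.go sep (fuel+1) [] cur acc = (cur.reverse :: acc).reverse := rfl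
theorem pvGo_cons (sep : List Char) (fuel : Nat) (c : Char) (rest cur : List Char)
    (acc : List (List Char)) :
    PySem.Chars.splitOn.go sep (fuel+1) (c :: rest) cur acc =
      (if sep.isPrefixOf (c :: rest) then
        PySem.Chars.splitOn.go sep fuel (List.drop sep.length (c :: rest)) [] (cur.reverse :: acc)
      else PySem.Chars.splitOn.go sep fuel rest (c :: cur) acc) := rfl

-- splitOn with a one-char separator is splitOnP
theorem pvSplitOn_go (ch : Char) :
    ∀ (fuel : Nat) (l cur : List Char) (acc : List (List Char)) (_ : l.length ≤ fuel),
      PySem.Chars.splitOn.go [ch] fuel l cur acc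
        = acc.reverse ++ (l.splitOnP (· == ch)).modifyHead (cur.reverse ++ ·) := by
  intro fuel
  induction fuel with
  | zero =>
    intro l cur acc hl
    have : l = [] := List.eq_nil_of_length_eq_zero (Nat.le_zero.mp hl)
    subst this
    simp [pvGo_zero, List.splitOnP_nil]
  | succ n ih =>
    intro l cur acc hl
    cases l with
    | nil => simp [pvGo_nil, List.splitOnP_nil]
    | cons c rest =>
      rw [pvGo_cons]
      obtain ⟨a, t, hs⟩ : ∃ a t, rest.splitOnP (· == ch) = a :: t := by
        cases h : rest.splitOnP (· == ch) with
        | nil => exact absurd h (List.splitOnP_ne_nil _ _)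
        | cons a t => exact ⟨a, t, rfl⟩
      by_cases hc : ch = c
      · subst hc
        have hpre : [ch].isPrefixOf (ch :: rest) = true := by simp [List.isPrefixOf]
        rw [if_pos hpre]
        simp only [List.length_cons, List.length_nil, Nat.zero_add, List.drop_succ_cons,
          List.drop_zero]
        rw [ih rest [] (cur.reverse :: acc) (by simpa using Nat.le_of_succ_le_succ hl)]
        rw [List.splitOnP_cons]
        simp [hs]
      · have hpre : [ch].isPrefixOf (c :: rest) = false := by
          simp [List.isPrefixOf]
          exact fun h => absurd h hc
        rw [if_neg (by simp [hpre])]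
        rw [ih rest (c :: cur) acc (by simpa using Nat.le_of_succ_le_succ hl)]
        rw [List.splitOnP_cons]
        have hcc : (c == ch) = false := by
          simp
          exact fun h => absurd h.symm hc
        simp [hcc, hs]

theorem pvSplitOn_eq (ch : Char) (cs : List Char) :
    PySem.Chars.splitOn cs [ch] = cs.splitOnP (· == ch) := by
  have := pvSplitOn_go ch (cs.length + 1) cs [] [] (by omega)
  rw [PySem.Chars.splitOn, this]
  cases cs.splitOnP (· == ch) with
  | nil => simp
  | cons a t => simp [List.modifyHead]

-- intercalate unfolding for a two-or-more list
theorem pvIntercalate_cons₂ {α : Type} (sep x y : List α) (t : List (List α)) :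
    List.intercalate sep (x :: y :: t) = x ++ sep ++ List.intercalate sep (y :: t) := by
  simp [List.intercalate, List.intersperse]

-- A's accumulation, then dropLast, is an intercalate
theorem pvJoin_dropLast (s : Char) :
    ∀ (ls : List (List Char)), ls ≠ [] →
      ((ls.map (fun l => l ++ [s])).flatten).dropLast = List.intercalate [s] ls := by
  intro ls
  induction ls with
  | nil => intro h; exact absurd rfl h
  | cons x t ih =>
    intro _
    cases t with
    | nil => simp [List.intercalate]
    | cons y ts =>
      rw [List.map_cons, List.flatten_cons, List.append_assoc, List.dropLast_append]
      rw [if_neg (by simp)]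
      rw [pvIntercalate_cons₂]
      rw [← ih (by simp)]
      rw [List.dropLast_append]
      rw [if_neg (by simp)]
      simp

-- first line unchanged, later lines transformed: what pvSub computes mid-line
def pvTailF (more : List Char) : List (List Char) → List (List Char)
  | [] => []
  | l :: rest => l :: rest.map (pvF more)

-- the core invariant of B's scan, by one induction for both flag values
theorem pvSub_spec (more : List Char) (cs : List Char) :
    pvSub more cs true = List.intercalate ['\n'] ((cs.splitOnP (· == '\n')).map (pvF more))
    ∧ pvSub more cs false = List.intercalate ['\n'] (pvTailF more (cs.splitOnP (· == '\n'))) := by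
  induction cs with
  | nil =>
    constructor <;> simp [pvSub, List.splitOnP_nil, pvTailF, pvF, List.intercalate,
      PySem.Chars.startswith]
  | cons c rest ih =>
    obtain ⟨ih₁, ih₂⟩ := ih
    obtain ⟨l, t, hsplit⟩ : ∃ l t, rest.splitOnP (· == '\n') = l :: t := by
      cases h : rest.splitOnP (· == '\n') with
      | nil => exact absurd h (List.splitOnP_ne_nil _ _)
      | cons a b => exact ⟨a, b, rfl⟩
    by_cases hn : c = '\n'
    · subst hn
      have hsp : (('\n' :: rest).splitOnP (· == '\n')) = [] :: rest.splitOnP (· == '\n') := by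
        rw [List.splitOnP_cons]; simp
      have hF : pvF more [] = [] := by
        simp [pvF, PySem.Chars.startswith, List.isPrefixOf]
      constructor <;>
      · simp only [pvSub, hsp, hsplit, List.map_cons, pvTailF, hF]
        rw [pvIntercalate_cons₂]
        simp [ih₁, hsplit]
    · have hcn : (c == '\n') = false := by simp [hn]
      have hsp : ((c :: rest).splitOnP (· == '\n'))
          = (c :: l) :: t := by
        rw [List.splitOnP_cons]; simp [hcn, hsplit]
      constructor
      · by_cases hh : c = '#'
        · subst hh
          have hF : pvF more ('#' :: l) = more ++ '#' :: l := by
            simp [pvF, PySem.Chars.startswith]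
          simp only [pvSub, hsp, List.map_cons, hF, hcn, ih₂, hsplit, pvTailF]
          cases t with
          | nil => simp [List.intercalate]
          | cons y ts =>
            simp only [List.map_cons]
            rw [pvIntercalate_cons₂, pvIntercalate_cons₂]
            simp
        · have hF : pvF more (c :: l) = c :: l := by
            simp [pvF, PySem.Chars.startswith, List.isPrefixOf]
            exact fun h => absurd h.symm hh
          have hch : (c == '#') = false := by simp [hh]
          simp only [pvSub, hsp, List.map_cons, hF, hcn, hch, Bool.and_false, ih₂, hsplit, pvTailF]
          cases t with
          | nil => simp [List.intercalate]
          | cons y ts =>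
            simp only [List.map_cons]
            rw [pvIntercalate_cons₂, pvIntercalate_cons₂]
            simp
      · simp only [pvSub, hsp, pvTailF, hcn, Bool.false_and, ih₂, hsplit]
        cases t with
        | nil => simp [List.intercalate]
        | cons y ts =>
          simp only [List.map_cons]
          rw [pvIntercalate_cons₂, pvIntercalate_cons₂]
          simp

-- A's foldl accumulation is a flatten of per-line pieces
theorem pvFoldA (more : List Char) (ls : List (List Char)) (acc : List Char) :
    ls.foldl (fun result line =>
        let line := if PySem.Chars.startswith line "#".toList then more ++ line else line
        result ++ line ++ "\n".toList) acc
      = acc ++ ((ls.map (pvF more)).map (fun l => l ++ ['\n'])).flatten := by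
  induction ls generalizing acc with
  | nil => simp
  | cons x t ih =>
    simp only [List.foldl_cons, List.map_cons, List.flatten_cons]
    rw [ih]
    simp [pvF]

-- ===== VERDICT (by name: the statement is the Claim_ definition above) =====
theorem markdown_downgrade_headings_spec : Claim_equal_markdown_downgrade_headings := by
  intro docsrc levels _
  unfold Spec_markdown_downgrade_headings
  unfold markdown_downgrade_headings markdown_downgrade_headings_alt
  simp only []
  rw [pvSub_foldl]
  have hsplit : PySem.Chars.splitOn docsrc.toList "\n".toList
      = docsrc.toList.splitOnP (· == '\n') := by
    have : "\n".toList = ['\n'] := rfl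
    rw [this, pvSplitOn_eq]
  rw [hsplit, pvFoldA]
  rw [PySem.List.slice_to_neg_one]
  simp only [List.nil_append]
  rw [pvJoin_dropLast '\n' _ (by
    intro h
    exact List.splitOnP_ne_nil _ _ (List.map_eq_nil_iff.mp h))]
  rw [(pvSub_spec (PySem.List.pyRepeat "#".toList levels) docsrc.toList).1]
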